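-- pv_equiv track=rewrite | github.com/oliviayeowl/Early-Childhood-Stuttering-Prediction-using-RoBERTa | ml_code/main_model-distilled.py | bio_to_salt
-- ===== SOURCE A (Python) =====
-- def bio_to_salt(tokens_with_labels):
--     result = []
--     i = 0
--     while i < len(tokens_with_labels):
--         word, label = tokens_with_labels[i]
--         if label.startswith('B-'):
--             tag_type = label.split('-')[1]
--             count = 0
--             j = i + 1
--             while j < len(tokens_with_labels) and tokens_with_labels[j][1] == f'I-{tag_type}':
--                 count += 1
--                 j += 1
--             if tag_type in ['WW', 'I', 'P']:
--                 result.append(f"[^ {tag_type}{count}]")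
--                 result.append(word)
--                 i = j
--             else:
--                 result.append(f"[^ {tag_type.lower()}]")
--                 result.append(word)
--                 i += 1
--         else:
--             result.append(word)
--             i += 1
--     return " ".join(result)
-- ===== SOURCE B (Python) =====
-- def bio_to_salt(tokens_with_labels):
--     # Single pass, no inner scan: pending = (tag, word, count) for an open special run.
--     out = []
--     pending = None
--     for word, label in tokens_with_labels:
--         if pending is not None:
--             tag, pword, cnt = pending
--             if label == 'I-' + tag:
--                 pending = (tag, pword, cnt + 1)
--                 continue
--             out.append('[^ ' + tag + str(cnt) + ']')
--             out.append(pword)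
--             pending = None
--         if label.startswith('B-'):
--             tag = label.split('-')[1]
--             if tag in ('WW', 'I', 'P'):
--                 pending = (tag, word, 0)
--             else:
--                 out.append('[^ ' + tag.lower() + ']')
--                 out.append(word)
--         else:
--             out.append(word)
--     if pending is not None:
--         tag, pword, cnt = pending
--         out.append('[^ ' + tag + str(cnt) + ']')
--         out.append(pword)
--     return ' '.join(out)
-- ===== Notes on version B (the rewrite author's own statement) =====
-- stated objective: alternative
-- what changed: Replaced A's index-driven while loop with an inner rescan that re-counts each I-run by a single structural pass over the token list that carries an optional pending (tag, word, count) state for an in-progress special run, flushed on mismatch or at the end.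
import Mathlib
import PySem

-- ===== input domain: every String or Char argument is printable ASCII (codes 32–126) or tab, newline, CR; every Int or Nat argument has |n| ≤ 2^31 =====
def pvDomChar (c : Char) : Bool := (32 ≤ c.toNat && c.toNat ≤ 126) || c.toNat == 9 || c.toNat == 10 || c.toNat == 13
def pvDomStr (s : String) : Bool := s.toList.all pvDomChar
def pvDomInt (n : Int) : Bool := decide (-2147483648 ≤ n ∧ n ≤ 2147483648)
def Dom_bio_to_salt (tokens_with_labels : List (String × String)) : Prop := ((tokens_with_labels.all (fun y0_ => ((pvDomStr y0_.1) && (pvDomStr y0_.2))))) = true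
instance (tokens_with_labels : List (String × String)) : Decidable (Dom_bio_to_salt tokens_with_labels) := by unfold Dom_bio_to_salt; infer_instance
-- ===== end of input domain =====

-- B replaces A's nested index-based while loops (inner rescans of the I-run) by a single
-- structural pass carrying an optional pending (tag, word, count) state; objective: alternative decomposition.

-- ===== PORT A =====
-- inner while loop of A: count consecutive tokens at j, j+1, ... whose label == "I-" ++ tag
def bioInner (toks : List (String × String)) (tag : String) (j : Nat) : Nat :=
  match h : toks[j]? with
  | some wl => if wl.2 == "I-" ++ tag then bioInner toks tag (j + 1) + 1 else 0
  | none => 0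
termination_by toks.length - j
decreasing_by
  have : j < toks.length := (List.getElem?_eq_some_iff.mp h).1
  omega

-- outer while loop of A, over index i with accumulator `result`
def bioLoop (toks : List (String × String)) (i : Nat) (acc : List String) : List String :=
  match h : toks[i]? with
  | none => acc
  | some (word, label) =>
    if PySem.Str.startswith label "B-" then
      let tag := (((PySem.Str.split? label "-").getD [])[1]?).getD ""
      let count := bioInner toks tag (i + 1)
      if tag = "WW" ∨ tag = "I" ∨ tag = "P" then
        bioLoop toks (i + 1 + count) (acc ++ ["[^ " ++ tag ++ toString count ++ "]", word])
      else
        bioLoop toks (i + 1) (acc ++ ["[^ " ++ PySem.Str.lower tag ++ "]", word])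
    else
      bioLoop toks (i + 1) (acc ++ [word])
termination_by toks.length - i
decreasing_by
  all_goals
    have : i < toks.length := (List.getElem?_eq_some_iff.mp h).1
    omega

def bio_to_salt (tokens_with_labels : List (String × String)) : String :=
  PySem.Str.join " " (bioLoop tokens_with_labels 0 [])

-- ===== PORT B =====
-- flush of B's pending state
def altFlush (p : Option (String × String × Nat)) : List String :=
  match p with
  | none => []
  | some (tag, pword, cnt) => ["[^ " ++ tag ++ toString cnt ++ "]", pword]

-- B's single for-loop; the token-handling code appears twice, mirroring Source B's
-- fall-through after a flush (the `continue` branch is the I- match)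
def altLoop : List (String × String) → Option (String × String × Nat) → List String → List String
  | [], pending, acc => acc ++ altFlush pending
  | (word, label) :: rest, some (tag, pword, cnt), acc =>
    if label == "I-" ++ tag then
      altLoop rest (some (tag, pword, cnt + 1)) acc
    else
      let acc := acc ++ altFlush (some (tag, pword, cnt))
      if PySem.Str.startswith label "B-" then
        let tag := (((PySem.Str.split? label "-").getD [])[1]?).getD ""
        if tag = "WW" ∨ tag = "I" ∨ tag = "P" then
          altLoop rest (some (tag, word, 0)) acc
        else
          altLoop rest none (acc ++ ["[^ " ++ PySem.Str.lower tag ++ "]", word])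
      else
        altLoop rest none (acc ++ [word])
  | (word, label) :: rest, none, acc =>
    if PySem.Str.startswith label "B-" then
      let tag := (((PySem.Str.split? label "-").getD [])[1]?).getD ""
      if tag = "WW" ∨ tag = "I" ∨ tag = "P" then
        altLoop rest (some (tag, word, 0)) acc
      else
        altLoop rest none (acc ++ ["[^ " ++ PySem.Str.lower tag ++ "]", word])
    else
      altLoop rest none (acc ++ [word])

def bio_to_salt_alt (tokens_with_labels : List (String × String)) : String :=
  PySem.Str.join " " (altLoop tokens_with_labels none [])

-- ===== PRECONDITION & SPEC =====
def Spec_bio_to_salt (tokens_with_labels : List (String × String)) (out : String) : Prop := out = bio_to_salt_alt tokens_with_labels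
instance (tokens_with_labels : List (String × String)) (out : String) : Decidable (Spec_bio_to_salt tokens_with_labels out) := by unfold Spec_bio_to_salt; infer_instance

-- ===== CLAIM (what is proved, stated in full; the proofs are below) =====
def Claim_equal_bio_to_salt : Prop := ∀ (tokens_with_labels : List (String × String)), Dom_bio_to_salt tokens_with_labels → Spec_bio_to_salt tokens_with_labels (bio_to_salt tokens_with_labels)

-- ===== LEMMAS AND PROOFS =====
-- list-level model of A's inner while loop
def runCount (tag : String) : List (String × String) → Nat
  | [] => 0
  | (_, lab) :: rest => if lab == "I-" ++ tag then runCount tag rest + 1 else 0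

theorem bioInner_eq_runCount (toks : List (String × String)) (tag : String) (j : Nat) :
    bioInner toks tag j = runCount tag (toks.drop j) := by
  fun_induction bioInner toks tag j
  case case1 j wl h hif ih =>
    have hj := (List.getElem?_eq_some_iff.mp h).1
    rw [List.drop_eq_getElem_cons hj, runCount]
    simp_all
  case case2 j wl h hif =>
    have hj := (List.getElem?_eq_some_iff.mp h).1
    rw [List.drop_eq_getElem_cons hj, runCount]
    simp_all
  case case3 j h =>
    have hj : toks.length ≤ j := by
      by_contra hc
      simp [List.getElem?_eq_getElem (by omega : j < toks.length)] at h
    rw [List.drop_eq_nil_of_le hj, runCount]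

-- list-level model of A's outer while loop
def aLoop : List (String × String) → List String → List String
  | [], acc => acc
  | (word, label) :: rest, acc =>
    if PySem.Str.startswith label "B-" then
      let tag := (((PySem.Str.split? label "-").getD [])[1]?).getD ""
      let count := runCount tag rest
      if tag = "WW" ∨ tag = "I" ∨ tag = "P" then
        aLoop (rest.drop count) (acc ++ ["[^ " ++ tag ++ toString count ++ "]", word])
      else
        aLoop rest (acc ++ ["[^ " ++ PySem.Str.lower tag ++ "]", word])
    else
      aLoop rest (acc ++ [word])
termination_by l => l.length
decreasing_by
  all_goals simp

theorem bioLoop_eq_aLoop (toks : List (String × String)) (i : Nat) (acc : List String) :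
    bioLoop toks i acc = aLoop (toks.drop i) acc := by
  fun_induction bioLoop toks i acc
  case case1 i acc h =>
    have hj : toks.length ≤ i := by
      by_contra hc
      simp [List.getElem?_eq_getElem (by omega : i < toks.length)] at h
    rw [List.drop_eq_nil_of_le hj, aLoop]
  case case2 i acc word label h hb tag count hsp ih =>
    have hj := (List.getElem?_eq_some_iff.mp h).1
    rw [List.drop_eq_getElem_cons hj, aLoop]
    have hrc : count = runCount tag (toks.drop (i+1)) := bioInner_eq_runCount ..
    simp only [(List.getElem?_eq_some_iff.mp h).2, hb, if_pos]
    rw [ih, hrc, List.drop_drop]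
    split_ifs with hs
    · rfl
    · exact absurd hsp hs
  case case3 i acc word label h hb tag hsp ih =>
    have hj := (List.getElem?_eq_some_iff.mp h).1
    rw [List.drop_eq_getElem_cons hj, aLoop]
    simp only [(List.getElem?_eq_some_iff.mp h).2, hb, if_pos]
    split_ifs with hs
    · exact absurd hs hsp
    · exact ih
  case case4 i acc word label h hb ih =>
    have hj := (List.getElem?_eq_some_iff.mp h).1
    rw [List.drop_eq_getElem_cons hj, aLoop]
    simp only [(List.getElem?_eq_some_iff.mp h).2, hb]
    simp only [Bool.false_eq_true, if_false]
    exact ih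

theorem altLoop_pending (rest : List (String × String)) (tag pword : String) (cnt : Nat)
    (acc : List String) :
    altLoop rest (some (tag, pword, cnt)) acc =
      altLoop (rest.drop (runCount tag rest)) none
        (acc ++ ["[^ " ++ tag ++ toString (cnt + runCount tag rest) ++ "]", pword]) := by
  induction rest generalizing cnt acc with
  | nil => simp [altLoop, altFlush, runCount]
  | cons wl r ih =>
    obtain ⟨w, l⟩ := wl
    by_cases hmatch : l == "I-" ++ tag
    · rw [altLoop, if_pos hmatch, ih, runCount, if_pos hmatch]
      have h2 : cnt + 1 + runCount tag r = cnt + (runCount tag r + 1) := by omega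
      simp [h2]
    · rw [altLoop, if_neg hmatch, runCount, if_neg hmatch]
      simp only [List.drop_zero, Nat.add_zero]
      rw [altLoop]
      rfl

theorem aLoop_eq_altLoop (l : List (String × String)) (acc : List String) :
    aLoop l acc = altLoop l none acc := by
  fun_induction aLoop l acc
  case case1 acc => simp [altLoop, altFlush]
  case case2 word label rest acc hb tag count hsp ih =>
    rw [altLoop, if_pos hb, if_pos hsp, altLoop_pending, ih]
    simp only [Nat.zero_add]
    rfl
  case case3 word label rest acc hb tag hsp ih =>
    rw [altLoop, if_pos hb, if_neg hsp, ih]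
  case case4 word label rest acc hb ih =>
    rw [altLoop, if_neg (by simp_all : ¬ PySem.Str.startswith label "B-" = true), ih]

-- ===== VERDICT (by name: the statement is the Claim_ definition above) =====
theorem bio_to_salt_spec : Claim_equal_bio_to_salt := by
  intro toks _
  unfold Spec_bio_to_salt bio_to_salt bio_to_salt_alt
  rw [bioLoop_eq_aLoop, List.drop_zero, aLoop_eq_altLoop]
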